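-- pv_equiv track=rewrite | github.com/A1CST/GENREG_GENOFLOW | Isolated_OLA_Base/chatbot.py | _strip_telemetry
-- ===== SOURCE A (Python) =====
-- def _strip_telemetry(text: str) -> str:
--     try:
--         start_tag = "<<TELEMETRY>>"
--         end_tag = "<<END_TELEMETRY>>"
--         out = []
--         i = 0
--         n = len(text)
--         while i < n:
--             s = text.find(start_tag, i)
--             if s == -1:
--                 out.append(text[i:])
--                 break
--             out.append(text[i:s])
--             e = text.find(end_tag, s + len(start_tag))
--             if e == -1:
--                 # no closing tag; drop rest
--                 break
--             i = e + len(end_tag)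
--         return "".join(out)
--     except Exception:
--         return text
-- ===== SOURCE B (Python) =====
-- def _strip_telemetry(text: str) -> str:
--     # Single-pass two-state (keep/drop) character scanner instead of find/slice jumps.
--     START = "<<TELEMETRY>>"
--     END = "<<END_TELEMETRY>>"
--     out = []
--     i = 0
--     n = len(text)
--     keeping = True
--     while i < n:
--         if keeping:
--             if text.startswith(START, i):
--                 i += len(START)
--                 keeping = False
--             else:
--                 out.append(text[i])
--                 i += 1
--         else:
--             if text.startswith(END, i):
--                 i += len(END)
--                 keeping = True
--             else:
--                 i += 1
--     return "".join(out)
-- ===== Notes on version B (the rewrite author's own statement) =====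
-- stated objective: alternative
-- what changed: A jumps through the string with repeated str.find and slice appends; B is a single left-to-right pass with a two-state (keep/drop) scanner that tests the tag at each position and emits or skips one character at a time.
import Mathlib
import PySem

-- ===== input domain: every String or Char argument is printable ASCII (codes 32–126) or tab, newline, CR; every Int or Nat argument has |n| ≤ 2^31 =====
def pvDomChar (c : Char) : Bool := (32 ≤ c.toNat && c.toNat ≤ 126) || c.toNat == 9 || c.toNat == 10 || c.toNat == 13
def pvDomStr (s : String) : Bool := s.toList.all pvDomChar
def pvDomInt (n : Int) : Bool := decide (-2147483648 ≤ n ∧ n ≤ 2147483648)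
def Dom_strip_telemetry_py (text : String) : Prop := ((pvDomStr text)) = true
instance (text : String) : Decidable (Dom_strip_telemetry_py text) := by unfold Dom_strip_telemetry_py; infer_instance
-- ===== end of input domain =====

-- B replaces A's find/slice jump loop by a one-pass two-state character scanner (objective: alternative).
-- A's try/except is unreachable for a str argument (every operation is total there), so neither port carries it.

-- the two tag constants
def pvTagS : List Char := "<<TELEMETRY>>".toList
def pvTagE : List Char := "<<END_TELEMETRY>>".toList

-- Python str.find(sub, i) modelled on the suffix text[i:]: lowest occurrence index of pat
-- in cs, none = -1.  Exact for the nonempty patterns used here (hand port, no PySem primitive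
-- takes a start index).
def pvFind (pat cs : List Char) : Option Nat :=
  if pat.isPrefixOf cs then some 0
  else
    match cs with
    | [] => none
    | _ :: t => (pvFind pat t).map (· + 1)

-- needed by loopA's termination proof
theorem pvFind_le (pat : List Char) : ∀ (cs : List Char) (s : Nat),
    pvFind pat cs = some s → s + pat.length ≤ cs.length := by
  intro cs
  induction cs with
  | nil =>
    intro s h
    unfold pvFind at h
    split at h
    · cases h
      next hp => simpa using (List.isPrefixOf_iff_prefix.mp hp).length_le
    · exact absurd h (by simp)
  | cons c t ih =>
    intro s h
    unfold pvFind at h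
    split at h
    · cases h
      next hp => simpa using (List.isPrefixOf_iff_prefix.mp hp).length_le
    · rcases Option.map_eq_some_iff.mp h with ⟨s', hs', rfl⟩
      have := ih s' hs'
      simp only [List.length_cons]
      omega

-- ===== PORT A =====
-- A's while loop: find the next start tag (keep the text before it), then the next end tag
-- after it (drop the block, or drop the rest if there is none), and continue after the end tag.
def loopA (cs : List Char) : List Char :=
  match h : pvFind pvTagS cs with
  | none => cs
  | some s =>
    cs.take s ++
      (match pvFind pvTagE (cs.drop (s + 13)) with
       | none => []
       | some e => loopA ((cs.drop (s + 13)).drop (e + 17)))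
termination_by cs.length
decreasing_by
  have h1 := pvFind_le pvTagS cs s h
  have h2 : pvTagS.length = 13 := rfl
  simp only [List.length_drop]
  omega

def strip_telemetry_py (text : String) : String := String.ofList (loopA text.toList)

-- ===== PORT B =====
-- B's while loop: one pass, state `keeping`; in keep mode emit characters until the start tag
-- is at the cursor, in drop mode skip characters until the end tag is at the cursor.
def loopB : List Char → Bool → List Char
  | [], _ => []
  | c :: t, true =>
    if pvTagS.isPrefixOf (c :: t) then loopB ((c :: t).drop 13) false
    else c :: loopB t true
  | c :: t, false =>
    if pvTagE.isPrefixOf (c :: t) then loopB ((c :: t).drop 17) true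
    else loopB t false
termination_by cs _ => cs.length
decreasing_by
  · simp only [List.length_drop, List.length_cons]; omega
  · simp only [List.length_cons]; omega
  · simp only [List.length_drop, List.length_cons]; omega
  · simp only [List.length_cons]; omega

def strip_telemetry_py_alt (text : String) : String := String.ofList (loopB text.toList true)

-- ===== PRECONDITION & SPEC =====
def Spec_strip_telemetry_py (text : String) (out : String) : Prop := out = strip_telemetry_py_alt text
instance (text : String) (out : String) : Decidable (Spec_strip_telemetry_py text out) := by unfold Spec_strip_telemetry_py; infer_instance

-- ===== CLAIM (what is proved, stated in full; the proofs are below) =====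
def Claim_equal_strip_telemetry_py : Prop := ∀ (text : String), Dom_strip_telemetry_py text → Spec_strip_telemetry_py text (strip_telemetry_py text)

-- ===== LEMMAS AND PROOFS =====

-- keep mode, no start tag anywhere: B emits the whole suffix
theorem loopB_keep_none : ∀ (cs : List Char), pvFind pvTagS cs = none → loopB cs true = cs := by
  intro cs
  induction cs with
  | nil => intro _; rw [loopB]
  | cons c t ih =>
    intro h
    unfold pvFind at h
    split at h
    · exact absurd h (by simp)
    · rw [loopB]
      next hnp =>
      rw [if_neg (by simpa using hnp)]
      have ht : pvFind pvTagS t = none := by simpa using h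
      rw [ih ht]

-- keep mode, first start tag at s: B emits the first s characters then switches to drop mode
theorem loopB_keep_some : ∀ (cs : List Char) (s : Nat), pvFind pvTagS cs = some s →
    loopB cs true = cs.take s ++ loopB (cs.drop (s + 13)) false := by
  intro cs
  induction cs with
  | nil =>
    intro s h
    exact absurd h (by simp [pvFind]; intro hp; exact absurd hp (by decide))
  | cons c t ih =>
    intro s h
    unfold pvFind at h
    split at h
    · cases h
      next hp =>
      rw [loopB, if_pos hp]
      simp
    · next hnp =>
      rcases Option.map_eq_some_iff.mp h with ⟨s', hs', rfl⟩
      rw [loopB, if_neg (by simpa using hnp), ih s' hs']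
      rfl

-- drop mode, no end tag anywhere: B drops the whole suffix
theorem loopB_drop_none : ∀ (cs : List Char), pvFind pvTagE cs = none → loopB cs false = [] := by
  intro cs
  induction cs with
  | nil => intro _; rw [loopB]
  | cons c t ih =>
    intro h
    unfold pvFind at h
    split at h
    · exact absurd h (by simp)
    · rw [loopB]
      next hnp =>
      rw [if_neg (by simpa using hnp)]
      exact ih (by simpa using h)

-- drop mode, first end tag at e: B drops up to the end of the tag and switches back
theorem loopB_drop_some : ∀ (cs : List Char) (e : Nat), pvFind pvTagE cs = some e →
    loopB cs false = loopB (cs.drop (e + 17)) true := by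
  intro cs
  induction cs with
  | nil =>
    intro e h
    exact absurd h (by simp [pvFind]; intro hp; exact absurd hp (by decide))
  | cons c t ih =>
    intro e h
    unfold pvFind at h
    split at h
    · cases h
      next hp => rw [loopB, if_pos hp]
    · next hnp =>
      rcases Option.map_eq_some_iff.mp h with ⟨e', he', rfl⟩
      rw [loopB, if_neg (by simpa using hnp), ih e' he']
      rfl

-- the two loops agree (strong induction on the length of the suffix)
theorem loopA_eq_loopB : ∀ (n : Nat) (cs : List Char), cs.length ≤ n → loopA cs = loopB cs true := by
  intro n
  induction n with
  | zero =>
    intro cs h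
    have : cs = [] := List.length_eq_zero_iff.mp (Nat.le_zero.mp h)
    subst this
    rw [loopA]
    split
    · rw [loopB]
    · next s hf => exact absurd hf (by simp [pvFind]; intro hp; exact absurd hp (by decide))
  | succ n ih =>
    intro cs hlen
    rw [loopA]
    split
    · next hf => exact (loopB_keep_none cs hf).symm
    · next s hf =>
      rw [loopB_keep_some cs s hf]
      congr 1
      split
      · next h2 => exact (loopB_drop_none _ h2).symm
      · next e h2 =>
        rw [loopB_drop_some _ e h2]
        apply ih
        have hA := pvFind_le pvTagS cs s hf
        have hB := pvFind_le pvTagE (cs.drop (s + 13)) e h2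
        have h13 : pvTagS.length = 13 := rfl
        simp only [List.length_drop] at *
        omega

-- ===== VERDICT (by name: the statement is the Claim_ definition above) =====
theorem strip_telemetry_py_spec : Claim_equal_strip_telemetry_py := by
  intro text _
  unfold Spec_strip_telemetry_py strip_telemetry_py strip_telemetry_py_alt
  exact congrArg String.ofList (loopA_eq_loopB text.toList.length text.toList le_rfl)
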